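-- pv_equiv track=rewrite | github.com/nikhilthakur258/Comparison_Framework | Repository_parser goldenCopy.py | parse_gradle_file
-- ===== SOURCE A (Python) =====
-- def parse_gradle_file(content):
--     java_version = 'N/A'
--     spring_boot_version = 'N/A'
--     lines = content.split('\n')
--     for line in lines:
--         if 'sourceCompatibility' in line or 'targetCompatibility' in line:
--             parts = line.split()
--             if len(parts) >= 2:
--                 java_version = parts[-1].replace("'", "").replace("\"", "")
--         if 'spring-boot' in line and 'version' in line:
--             parts = line.split()
--             if len(parts) >= 2:
--                 spring_boot_version = parts[-1].replace("'", "").replace("\"", "")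
--     return java_version, spring_boot_version
-- ===== SOURCE B (Python) =====
-- def parse_gradle_file(content):
--     lines = content.split('\n')
--
--     def last_value(pred):
--         # scan from the end; first qualifying line (pred holds AND >=2 tokens) wins
--         for line in reversed(lines):
--             if pred(line):
--                 parts = line.split()
--                 if len(parts) >= 2:
--                     return parts[-1].replace("'", "").replace('"', "")
--         return 'N/A'
--
--     java_version = last_value(
--         lambda l: 'sourceCompatibility' in l or 'targetCompatibility' in l)
--     spring_boot_version = last_value(
--         lambda l: 'spring-boot' in l and 'version' in l)
--     return java_version, spring_boot_version
-- ===== Notes on version B (the rewrite author's own statement) =====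
-- stated objective: alternative
-- what changed: Replaces the single forward pass that keeps overwriting two accumulators with two independent backward scans that each stop at the last qualifying line (predicate holds and the line has >= 2 tokens).
import Mathlib
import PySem

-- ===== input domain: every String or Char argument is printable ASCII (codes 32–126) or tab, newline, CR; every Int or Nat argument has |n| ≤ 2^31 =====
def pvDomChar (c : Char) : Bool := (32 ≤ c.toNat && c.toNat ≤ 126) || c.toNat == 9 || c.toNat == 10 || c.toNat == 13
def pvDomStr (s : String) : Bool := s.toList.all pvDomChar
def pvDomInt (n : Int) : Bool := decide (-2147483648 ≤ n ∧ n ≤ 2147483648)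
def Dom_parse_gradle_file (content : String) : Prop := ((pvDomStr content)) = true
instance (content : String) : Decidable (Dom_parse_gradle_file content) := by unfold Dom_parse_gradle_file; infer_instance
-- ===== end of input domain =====

-- B replaces A's single forward pass with two accumulators by two independent
-- backward scans, each stopping at the last qualifying line (alternative decomposition, same cost).

-- ===== PORT A =====
-- literal transliteration of A: one forward fold over the lines, overwriting (java, spring) state
def parse_gradle_file (content : String) : String × String :=
  let lines := (PySem.Str.split? content "\n").getD []
  lines.foldl (fun (st : String × String) line =>
    let st1 :=
      if PySem.Str.isIn "sourceCompatibility" line || PySem.Str.isIn "targetCompatibility" line then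
        let parts := PySem.Str.split₀ line
        if parts.length ≥ 2 then
          (PySem.Str.replace (PySem.Str.replace ((PySem.List.pyGet? parts (-1)).getD "") "'" "") "\"" "", st.2)
        else st
      else st
    if PySem.Str.isIn "spring-boot" line && PySem.Str.isIn "version" line then
      let parts := PySem.Str.split₀ line
      if parts.length ≥ 2 then
        (st1.1, PySem.Str.replace (PySem.Str.replace ((PySem.List.pyGet? parts (-1)).getD "") "'" "") "\"" "")
      else st1
    else st1) ("N/A", "N/A")

-- ===== PORT B =====
-- backward scan: first line (from the end) whose predicate holds AND that has >= 2 tokens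
def pvLastValue (lines : List String) (pred : String → Bool) : String :=
  match lines with
  | [] => "N/A"
  | line :: rest =>
    if pred line then
      let parts := PySem.Str.split₀ line
      if parts.length ≥ 2 then
        PySem.Str.replace (PySem.Str.replace ((PySem.List.pyGet? parts (-1)).getD "") "'" "") "\"" ""
      else pvLastValue rest pred
    else pvLastValue rest pred

def parse_gradle_file_alt (content : String) : String × String :=
  let revLines := ((PySem.Str.split? content "\n").getD []).reverse
  (pvLastValue revLines
     (fun l => PySem.Str.isIn "sourceCompatibility" l || PySem.Str.isIn "targetCompatibility" l),
   pvLastValue revLines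
     (fun l => PySem.Str.isIn "spring-boot" l && PySem.Str.isIn "version" l))

-- ===== PRECONDITION & SPEC =====
def Spec_parse_gradle_file (content : String) (out : String × String) : Prop := out = parse_gradle_file_alt content
instance (content : String) (out : String × String) : Decidable (Spec_parse_gradle_file content out) := by unfold Spec_parse_gradle_file; infer_instance

-- ===== CLAIM (what is proved, stated in full; the proofs are below) =====
def Claim_equal_parse_gradle_file : Prop := ∀ (content : String), Dom_parse_gradle_file content → Spec_parse_gradle_file content (parse_gradle_file content)

-- ===== LEMMAS AND PROOFS =====

-- the cleaned last token of a line
def pvVal (line : String) : String :=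
  PySem.Str.replace (PySem.Str.replace ((PySem.List.pyGet? (PySem.Str.split₀ line) (-1)).getD "") "'" "") "\"" ""

-- combined qualifying condition
def pvCond (pred : String → Bool) (line : String) : Bool :=
  pred line && decide ((PySem.Str.split₀ line).length ≥ 2)

lemma pvLastValue_eq (lines : List String) (pred : String → Bool) :
    pvLastValue lines pred =
      match lines.find? (pvCond pred) with
      | some l => pvVal l
      | none => "N/A" := by
  induction lines with
  | nil => rfl
  | cons l rest ih =>
    simp only [pvLastValue, List.find?, pvCond, pvVal]
    by_cases hp : pred l
    · by_cases hl : (PySem.Str.split₀ l).length ≥ 2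
      · simp [hp, hl]
      · simp [hp, hl, ih, pvVal]
    · simp [hp, ih, pvVal]

-- the last-wins forward fold equals "last qualifying line"
lemma foldl_last (lines : List String) (pred : String → Bool) (a : String) :
    lines.foldl (fun v l => if pvCond pred l then pvVal l else v) a =
      match lines.reverse.find? (pvCond pred) with
      | some l => pvVal l
      | none => a := by
  induction lines generalizing a with
  | nil => rfl
  | cons l rest ih =>
    simp only [List.foldl_cons, List.reverse_cons, ih, List.find?_append]
    cases h : rest.reverse.find? (pvCond pred) with
    | some x => simp
    | none =>
      simp only [Option.none_or]
      by_cases hc : pvCond pred l <;> simp [List.find?, hc]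

def pvPredJ : String → Bool :=
  fun l => PySem.Str.isIn "sourceCompatibility" l || PySem.Str.isIn "targetCompatibility" l
def pvPredS : String → Bool :=
  fun l => PySem.Str.isIn "spring-boot" l && PySem.Str.isIn "version" l

-- A's per-line step acts on the two components independently
lemma pvStep_eq (l a b : String) :
    (let st1 :=
      if PySem.Str.isIn "sourceCompatibility" l || PySem.Str.isIn "targetCompatibility" l then
        let parts := PySem.Str.split₀ l
        if parts.length ≥ 2 then
          (PySem.Str.replace (PySem.Str.replace ((PySem.List.pyGet? parts (-1)).getD "") "'" "") "\"" "", (a, b).2)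
        else (a, b)
      else (a, b)
     if PySem.Str.isIn "spring-boot" l && PySem.Str.isIn "version" l then
       let parts := PySem.Str.split₀ l
       if parts.length ≥ 2 then
         (st1.1, PySem.Str.replace (PySem.Str.replace ((PySem.List.pyGet? parts (-1)).getD "") "'" "") "\"" "")
       else st1
     else st1) =
    ((if pvCond pvPredJ l then pvVal l else a), (if pvCond pvPredS l then pvVal l else b)) := by
  by_cases h1 : PySem.Str.isIn "sourceCompatibility" l || PySem.Str.isIn "targetCompatibility" l <;>
  by_cases h2 : PySem.Str.isIn "spring-boot" l && PySem.Str.isIn "version" l <;>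
  by_cases h3 : (PySem.Str.split₀ l).length ≥ 2 <;>
  simp_all [pvCond, pvPredJ, pvPredS, pvVal] <;>
  (try split_ifs <;> simp_all)

-- A's paired fold splits into two independent one-value folds
lemma foldl_pair (lines : List String) (a b : String) :
    lines.foldl (fun (st : String × String) line =>
      let st1 :=
        if PySem.Str.isIn "sourceCompatibility" line || PySem.Str.isIn "targetCompatibility" line then
          let parts := PySem.Str.split₀ line
          if parts.length ≥ 2 then
            (PySem.Str.replace (PySem.Str.replace ((PySem.List.pyGet? parts (-1)).getD "") "'" "") "\"" "", st.2)
          else st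
        else st
      if PySem.Str.isIn "spring-boot" line && PySem.Str.isIn "version" line then
        let parts := PySem.Str.split₀ line
        if parts.length ≥ 2 then
          (st1.1, PySem.Str.replace (PySem.Str.replace ((PySem.List.pyGet? parts (-1)).getD "") "'" "") "\"" "")
        else st1
      else st1) (a, b) =
    (lines.foldl (fun v l => if pvCond pvPredJ l then pvVal l else v) a,
     lines.foldl (fun v l => if pvCond pvPredS l then pvVal l else v) b) := by
  induction lines generalizing a b with
  | nil => rfl
  | cons l rest ih =>
    simp only [List.foldl_cons]
    rw [pvStep_eq l a b]
    exact ih _ _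

-- ===== VERDICT (by name: the statement is the Claim_ definition above) =====
theorem parse_gradle_file_spec : Claim_equal_parse_gradle_file := by
  intro content _
  show parse_gradle_file content = parse_gradle_file_alt content
  unfold parse_gradle_file parse_gradle_file_alt
  rw [foldl_pair, foldl_last, foldl_last, ← pvLastValue_eq, ← pvLastValue_eq]
  rfl
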